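-- pv_equiv track=rewrite | github.com/eatingallday/graphRAG | hpg/builder.py | _smali_type_to_java
-- ===== SOURCE A (Python) =====
-- _SMALI_TO_JAVA = {
--     "V": "void", "Z": "boolean", "B": "byte", "C": "char",
--     "S": "short", "I": "int", "J": "long", "F": "float", "D": "double",
-- }
--
-- def _smali_type_to_java(t: str) -> str:
--     if t in _SMALI_TO_JAVA:
--         return _SMALI_TO_JAVA[t]
--     if t.startswith("["):
--         return _smali_type_to_java(t[1:]) + "[]"
--     if t.startswith("L") and t.endswith(";"):
--         return t[1:-1].replace("/", ".")
--     return t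
-- ===== SOURCE B (Python) =====
-- _SMALI_TO_JAVA = {
--     "V": "void", "Z": "boolean", "B": "byte", "C": "char",
--     "S": "short", "I": "int", "J": "long", "F": "float", "D": "double",
-- }
--
-- def _smali_type_to_java(t: str) -> str:
--     base = t.lstrip("[")
--     depth = len(t) - len(base)
--     if base in _SMALI_TO_JAVA:
--         conv = _SMALI_TO_JAVA[base]
--     elif base.startswith("L") and base.endswith(";"):
--         conv = base[1:-1].replace("/", ".")
--     else:
--         conv = base
--     return conv + "[]" * depth
-- ===== Notes on version B (the rewrite author's own statement) =====
-- stated objective: simpler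
-- what changed: B replaces A's per-bracket recursion with a single decomposition: strip all leading '[' at once to get the array depth, convert the base descriptor with the non-array branches only, then append '[]' * depth.
import Mathlib
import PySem

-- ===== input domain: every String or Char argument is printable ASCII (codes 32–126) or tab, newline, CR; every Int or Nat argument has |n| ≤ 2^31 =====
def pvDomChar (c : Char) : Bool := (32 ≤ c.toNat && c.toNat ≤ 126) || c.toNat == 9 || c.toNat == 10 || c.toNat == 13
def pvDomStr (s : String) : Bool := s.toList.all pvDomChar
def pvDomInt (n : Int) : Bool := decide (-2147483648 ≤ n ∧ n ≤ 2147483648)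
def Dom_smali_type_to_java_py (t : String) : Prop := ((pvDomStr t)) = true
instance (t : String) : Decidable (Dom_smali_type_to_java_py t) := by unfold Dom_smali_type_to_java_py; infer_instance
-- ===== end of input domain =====

-- B strips all leading '[' at once, converts the base descriptor with the non-array
-- branches, and appends '[]' per bracket — a single pass instead of A's per-bracket
-- recursion (objective: simpler).

-- the module-level dict _SMALI_TO_JAVA: lookup on its nine single-char keys
def smaliGet? (cs : List Char) : Option (List Char) :=
  if cs = ['V'] then some "void".toList
  else if cs = ['Z'] then some "boolean".toList
  else if cs = ['B'] then some "byte".toList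
  else if cs = ['C'] then some "char".toList
  else if cs = ['S'] then some "short".toList
  else if cs = ['I'] then some "int".toList
  else if cs = ['J'] then some "long".toList
  else if cs = ['F'] then some "float".toList
  else if cs = ['D'] then some "double".toList
  else none

-- ===== PORT A =====
def smaliA (cs : List Char) : List Char :=
  -- A's branch order kept: dict membership first, then the '[' test, then L…;
  match smaliGet? cs, cs with
  | some v, _ => v
  | none, '[' :: rest => smaliA rest ++ ['[', ']']
  | none, cs =>
    if PySem.Chars.startswith cs ['L'] && PySem.Chars.endswith cs [';'] then
      PySem.Chars.replace (PySem.Chars.slice cs (some 1) (some (-1))) ['/'] ['.']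
    else cs

def smali_type_to_java_py (t : String) : String := String.ofList (smaliA t.toList)

-- ===== PORT B =====
def smaliB (cs : List Char) : List Char :=
  let base := cs.dropWhile (fun c => c == '[')   -- t.lstrip("[") , exact for this single ASCII char
  let depth := cs.length - base.length
  let conv :=
    match smaliGet? base with
    | some v => v
    | none =>
      if PySem.Chars.startswith base ['L'] && PySem.Chars.endswith base [';'] then
        PySem.Chars.replace (PySem.Chars.slice base (some 1) (some (-1))) ['/'] ['.']
      else base
  conv ++ (List.replicate depth ['[', ']']).flatten

def smali_type_to_java_py_alt (t : String) : String := String.ofList (smaliB t.toList)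

-- ===== PRECONDITION & SPEC =====
def Spec_smali_type_to_java_py (t : String) (out : String) : Prop := out = smali_type_to_java_py_alt t
instance (t : String) (out : String) : Decidable (Spec_smali_type_to_java_py t out) := by unfold Spec_smali_type_to_java_py; infer_instance

-- ===== CLAIM (what is proved, stated in full; the proofs are below) =====
def Claim_equal_smali_type_to_java_py : Prop := ∀ (t : String), Dom_smali_type_to_java_py t → Spec_smali_type_to_java_py t (smali_type_to_java_py t)

-- ===== LEMMAS AND PROOFS =====
theorem smaliGet?_bracket (rest : List Char) : smaliGet? ('[' :: rest) = none := by
  simp [smaliGet?]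

def smaliBase (cs : List Char) : List Char :=
  match smaliGet? cs with
  | some v => v
  | none =>
    if PySem.Chars.startswith cs ['L'] && PySem.Chars.endswith cs [';'] then
      PySem.Chars.replace (PySem.Chars.slice cs (some 1) (some (-1))) ['/'] ['.']
    else cs

theorem smaliA_bracket (rest : List Char) :
    smaliA ('[' :: rest) = smaliA rest ++ ['[', ']'] := by
  rw [smaliA.eq_def, smaliGet?_bracket]
  rfl

theorem smaliA_of_not_bracket (cs : List Char) (h : cs.head? ≠ some '[') :
    smaliA cs = smaliBase cs := by
  rw [smaliA.eq_def, smaliBase]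
  cases hget : smaliGet? cs with
  | some v => rfl
  | none =>
    cases cs with
    | nil => rfl
    | cons c rest =>
      have hc : c ≠ '[' := by simpa using h
      split
      · simp_all
      · simp_all
      · rfl

theorem smaliB_bracket (rest : List Char) :
    smaliB ('[' :: rest) = smaliB rest ++ ['[', ']'] := by
  have hle : (rest.dropWhile (fun c => c == '[')).length ≤ rest.length :=
    List.length_dropWhile_le _ _
  have h1 : (('[' :: rest).dropWhile (fun c => c == '[')) = rest.dropWhile (fun c => c == '[') := by
    rw [List.dropWhile_cons]; simp
  simp only [smaliB, h1, List.length_cons]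
  have hdepth : rest.length + 1 - (rest.dropWhile (fun c => c == '[')).length
      = (rest.length - (rest.dropWhile (fun c => c == '[')).length) + 1 := by omega
  rw [hdepth, List.replicate_succ', List.flatten_append]
  simp [List.append_assoc]

theorem smaliB_of_not_bracket (cs : List Char) (h : cs.head? ≠ some '[') :
    smaliB cs = smaliBase cs := by
  have hdw : cs.dropWhile (fun c => c == '[') = cs := by
    cases cs with
    | nil => rfl
    | cons c rest =>
      have hc : (c == '[') = false := by
        simpa using fun hc => h (by simp [hc])
      rw [List.dropWhile_cons, hc]; simp
  simp [smaliB, smaliBase, hdw]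

theorem smaliA_eq_smaliB (cs : List Char) : smaliA cs = smaliB cs := by
  induction cs with
  | nil => rfl
  | cons c rest ih =>
    by_cases hc : c = '['
    · subst hc
      rw [smaliB_bracket, smaliA_bracket, ih]
    · rw [smaliA_of_not_bracket (c :: rest) (by simpa using hc),
        smaliB_of_not_bracket (c :: rest) (by simpa using hc)]

-- ===== VERDICT (by name: the statement is the Claim_ definition above) =====
theorem smali_type_to_java_py_spec : Claim_equal_smali_type_to_java_py := by
  intro t _
  unfold Spec_smali_type_to_java_py smali_type_to_java_py smali_type_to_java_py_alt
  rw [smaliA_eq_smaliB]
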